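-- pv_equiv track=rewrite | github.com/SashaKrivaltsevich/project1.2 | lesson 9/task1.py | get_common_dict
-- ===== SOURCE A (Python) =====
-- from collections import defaultdict
--
-- def get_common_dict(first_dct: dict, second_dct: dict) -> dict:
--     merged_dict = [first_dct, second_dct]
--     key_list = []
--     [key_list.append(key) for item in merged_dict
--      for key in item.keys() if key not in key_list]
--     result = defaultdict(list)
--     for item in merged_dict:
--         for key in key_list:
--             result[key].append(item.get(key))
--
--     return dict(result)
-- ===== SOURCE B (Python) =====
-- def get_common_dict(first_dct: dict, second_dct: dict) -> dict:
--     pairs = []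
--     seen = set()
--     for key in (*first_dct, *second_dct):
--         if key not in seen:
--             seen.add(key)
--             pairs.append((key, [first_dct.get(key), second_dct.get(key)]))
--     return dict(pairs)
-- ===== Notes on version B (the rewrite author's own statement) =====
-- stated objective: alternative
-- what changed: A stages the work: it first materialises a dedup key_list via a quadratic list-membership comprehension, then runs two container-major passes that append each dict's .get(key) column-wise into a defaultdict; B is one fused row-major pass over the chained key sequence with a seen set, emitting each key's complete (key, [v1, v2]) row immediately into a flat pair list and calling dict() once at the end -- no key_list, no defaultdict, no column accumulation.
import Mathlib
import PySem

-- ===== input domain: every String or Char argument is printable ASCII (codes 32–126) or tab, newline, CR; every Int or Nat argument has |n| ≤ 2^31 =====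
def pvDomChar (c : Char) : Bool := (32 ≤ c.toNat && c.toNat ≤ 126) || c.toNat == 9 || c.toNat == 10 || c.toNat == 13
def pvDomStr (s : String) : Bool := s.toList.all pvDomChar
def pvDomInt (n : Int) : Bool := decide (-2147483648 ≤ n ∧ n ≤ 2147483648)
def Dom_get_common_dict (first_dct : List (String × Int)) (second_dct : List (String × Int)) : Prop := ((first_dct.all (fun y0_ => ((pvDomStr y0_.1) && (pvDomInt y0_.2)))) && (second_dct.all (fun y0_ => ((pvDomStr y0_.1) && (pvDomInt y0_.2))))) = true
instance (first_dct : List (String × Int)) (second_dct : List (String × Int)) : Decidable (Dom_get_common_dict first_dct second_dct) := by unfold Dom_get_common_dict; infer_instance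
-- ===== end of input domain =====

-- B replaces A's staged key_list + two column-major defaultdict-append passes by one fused
-- row-major pass over the chained keys with a seen set, emitting complete rows into a pair
-- list and calling dict() once (alternative decomposition; avoids the quadratic key_list scan).

-- ===== PORT A =====
def get_common_dict (first_dct : List (String × Int)) (second_dct : List (String × Int)) : List (String × List (Option Int)) :=
  let d1 := PySem.Dict.ofList first_dct
  let d2 := PySem.Dict.ofList second_dct
  let merged := [d1, d2]
  -- [key_list.append(key) for item in merged_dict for key in item.keys() if key not in key_list]
  let keyList : PySem.Set String :=
    merged.foldl (fun kl item => item.keys.foldl (fun kl k => PySem.Set.add kl k) kl) ([] : PySem.Set String)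
  -- result = defaultdict(list); for item in merged: for key in key_list: result[key].append(item.get(key))
  let result : PySem.Dict String (List (Option Int)) :=
    merged.foldl (fun r item =>
      keyList.foldl (fun r k => r.modify k [] (· ++ [item.get? k])) r) PySem.Dict.empty
  result.items

-- ===== PORT B =====
def get_common_dict_alt (first_dct : List (String × Int)) (second_dct : List (String × Int)) : List (String × List (Option Int)) :=
  let d1 := PySem.Dict.ofList first_dct
  let d2 := PySem.Dict.ofList second_dct
  -- pairs = []; seen = set(); for key in (*first, *second): if key not in seen: seen.add(key); pairs.append(...)
  let st := (d1.keys ++ d2.keys).foldl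
    (fun (st : List (String × List (Option Int)) × PySem.Set String) k =>
      if PySem.Set.contains st.2 k then st
      else (st.1 ++ [(k, [d1.get? k, d2.get? k])], PySem.Set.add st.2 k))
    (([], []) : List (String × List (Option Int)) × PySem.Set String)
  (PySem.Dict.ofList st.1).items

-- ===== PRECONDITION & SPEC =====
def Spec_get_common_dict (first_dct : List (String × Int)) (second_dct : List (String × Int)) (out : List (String × List (Option Int))) : Prop := out = get_common_dict_alt first_dct second_dct
instance (first_dct : List (String × Int)) (second_dct : List (String × Int)) (out : List (String × List (Option Int))) : Decidable (Spec_get_common_dict first_dct second_dct out) := by unfold Spec_get_common_dict; infer_instance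

-- ===== CLAIM (what is proved, stated in full; the proofs are below) =====
def Claim_equal_get_common_dict : Prop := ∀ (first_dct : List (String × Int)) (second_dct : List (String × Int)), Dom_get_common_dict first_dct second_dct → Spec_get_common_dict first_dct second_dct (get_common_dict first_dct second_dct)

-- ===== LEMMAS AND PROOFS =====

-- B's fused pass appends, for each not-yet-seen key in order, the complete row (k, f k).
theorem foldl_seen_rows (f : String → List (Option Int)) :
    ∀ (l : List String) (p : List (String × List (Option Int))) (seen : PySem.Set String),
      (l.foldl
        (fun (st : List (String × List (Option Int)) × PySem.Set String) k =>
          if PySem.Set.contains st.2 k then st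
          else (st.1 ++ [(k, f k)], PySem.Set.add st.2 k)) (p, seen)).1
        = p ++ ((PySem.Set.ofList l).filter (fun k => !(PySem.Set.contains seen k))).map
            (fun k => (k, f k)) := by
  intro l
  induction l with
  | nil => intro p seen; simp
  | cons k rest ih =>
    intro p seen
    by_cases h : PySem.Set.contains seen k = true
    · simp only [List.foldl_cons, h, if_true]
      rw [ih p seen]
      have hupd : PySem.Set.update seen (k :: rest) = PySem.Set.update seen rest := by
        have hk : k ∈ seen := by simpa using h
        rw [PySem.Set.update_cons]
        simp [PySem.Set.add, hk]
      have := congrArg (fun s => s.drop seen.length) hupd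
      simp only [PySem.Set.update_eq_append_filter, List.drop_left] at this
      -- ofList (k::rest) filtered = ofList rest filtered, when k is already seen
      rw [this]
    · have h' : PySem.Set.contains seen k = false := by simpa using h
      simp only [List.foldl_cons, h', Bool.false_eq_true, if_false]
      rw [ih (p ++ [(k, f k)]) (PySem.Set.add seen k)]
      have hk : k ∉ seen := by simpa using h'
      have hadd : PySem.Set.add seen k = seen ++ [k] := by simp [PySem.Set.add, hk]
      have hupd : PySem.Set.update seen (k :: rest) = PySem.Set.update (seen ++ [k]) rest := by
        rw [PySem.Set.update_cons, hadd]
      have hstep := congrArg (fun s => s.drop seen.length) hupd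
      simp only [PySem.Set.update_eq_append_filter, List.drop_left] at hstep
      have hdrop : (seen ++ [k] ++ ((PySem.Set.ofList rest).filter
            (fun y => !(PySem.Set.contains (seen ++ [k]) y)))).drop seen.length
          = [k] ++ (PySem.Set.ofList rest).filter (fun y => !(PySem.Set.contains (seen ++ [k]) y)) := by
        rw [List.append_assoc, List.drop_left]
      rw [hdrop] at hstep
      rw [hadd, hstep]
      simp [List.append_assoc]

-- A's per-item inner pass over keyList, viewed as a fold over (key, value) pairs.
theorem foldl_modify_keys (g : String → Option Int) (l : List String)
    (r : PySem.Dict String (List (Option Int))) (c : String) :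
    (l.foldl (fun r k => r.modify k [] (· ++ [g k])) r).getD c []
      = r.getD c [] ++ (l.filter (fun k => k == c)).map g := by
  have h : l.foldl (fun r k => r.modify k [] (· ++ [g k])) r
      = (l.map (fun k => (k, g k))).foldl (fun d p => d.modify p.1 [] (· ++ [p.2])) r := by
    rw [List.foldl_map]
  rw [h, PySem.Dict.getD_foldl_modify_append]
  congr 1
  rw [List.filter_map, List.map_map]
  rfl

-- on a Nodup list, filtering for one present element gives exactly that element
theorem filter_eq_singleton {l : List String} (hnd : l.Nodup) {c : String} (hc : c ∈ l) :
    l.filter (fun k => k == c) = [c] := by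
  rw [List.filter_beq, List.count_eq_one_of_mem hnd hc]
  rfl

-- dict(pairs) for a pair list with distinct keys returns exactly that list as items
theorem items_ofList_nodup (l : List (String × List (Option Int)))
    (hnd : (l.map Prod.fst).Nodup) : (PySem.Dict.ofList l).items = l := by
  have hfold : PySem.Dict.ofList l
      = l.foldl (fun d p => d.insert p.1 p.2) PySem.Dict.empty := rfl
  rw [hfold]
  have := PySem.Dict.items_foldl_insert_fresh (l := l) (k := Prod.fst) (v := Prod.snd)
    (d := PySem.Dict.empty) (by intro a _; simp) hnd
  simpa using this

theorem get_common_dict_eq (first_dct second_dct : List (String × Int)) :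
    get_common_dict first_dct second_dct = get_common_dict_alt first_dct second_dct := by
  unfold get_common_dict get_common_dict_alt
  set d1 := PySem.Dict.ofList first_dct with hd1
  set d2 := PySem.Dict.ofList second_dct with hd2
  simp only [List.foldl_cons, List.foldl_nil]
  have h1n : d1.keys.Nodup := PySem.Dict.nodup_keys_ofList _
  have h2n : d2.keys.Nodup := PySem.Dict.nodup_keys_ofList _
  have hinner : ∀ (kl : PySem.Set String) (ks : List String),
      ks.foldl (fun kl k => PySem.Set.add kl k) kl = PySem.Set.update kl ks := fun _ _ => rfl
  rw [hinner, hinner]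
  have hK0 : PySem.Set.update ([] : PySem.Set String) d1.keys = d1.keys := by
    rw [PySem.Set.update_nil_left, PySem.Set.ofList_eq_self_of_nodup _ h1n]
  rw [hK0]
  set K : List String := PySem.Set.update d1.keys d2.keys with hKdef
  have hKnd : K.Nodup := PySem.Set.nodup_update _ _ h1n
  -- A's result dict: keys and values
  have hAkeys : ∀ (r : PySem.Dict String (List (Option Int))) (g : String → Option Int),
      (K.foldl (fun r k => r.modify k [] (· ++ [g k])) r).keys = PySem.Set.update r.keys K :=
    fun r g => PySem.Dict.keys_foldl_modify K [] (fun _ k v => v ++ [g k]) r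
  set rA1 := K.foldl (fun r k => r.modify k [] (· ++ [d1.get? k])) PySem.Dict.empty with hrA1
  set rA2 := K.foldl (fun r k => r.modify k [] (· ++ [d2.get? k])) rA1 with hrA2
  have hrA1keys : rA1.keys = K := by
    rw [hrA1, hAkeys, PySem.Dict.keys_empty, PySem.Set.update_nil_left,
      PySem.Set.ofList_eq_self_of_nodup _ hKnd]
  have hrA2keys : rA2.keys = K := by
    rw [hrA2, hAkeys, hrA1keys, PySem.Set.update_eq_append_filter,
      PySem.Set.ofList_eq_self_of_nodup _ hKnd]
    have : K.filter (fun y => !(PySem.Set.contains K y)) = [] := by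
      apply List.filter_eq_nil_iff.mpr
      intro a ha
      simp [PySem.Set.contains_eq_listContains, ha]
    rw [this, List.append_nil]
  have hval : ∀ c ∈ K, rA2.getD c [] = [d1.get? c, d2.get? c] := by
    intro c hc
    rw [hrA2, foldl_modify_keys, hrA1, foldl_modify_keys, PySem.Dict.getD_empty,
      filter_eq_singleton hKnd hc]
    rfl
  set f : String → String × List (Option Int) := fun k => (k, [d1.get? k, d2.get? k]) with hf
  -- B's pair list is K.map f
  have hBpairs : ((d1.keys ++ d2.keys).foldl
      (fun (st : List (String × List (Option Int)) × PySem.Set String) k =>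
        if PySem.Set.contains st.2 k then st
        else (st.1 ++ [(k, [d1.get? k, d2.get? k])], PySem.Set.add st.2 k))
      (([], []) : List (String × List (Option Int)) × PySem.Set String)).1
      = K.map f := by
    rw [foldl_seen_rows (fun k => [d1.get? k, d2.get? k]) (d1.keys ++ d2.keys) [] []]
    have : ((PySem.Set.ofList (d1.keys ++ d2.keys)).filter
        (fun k => !(PySem.Set.contains ([] : PySem.Set String) k))) = K := by
      rw [PySem.Set.ofList_append, PySem.Set.ofList_eq_self_of_nodup _ h1n, ← hKdef]
      simp [PySem.Set.contains]
    rw [this]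
    simp [hf]
  rw [hBpairs]
  have hKmapfst : (K.map f).map Prod.fst = K := by
    rw [List.map_map]; simp [Function.comp_def, hf]
  rw [items_ofList_nodup _ (by rw [hKmapfst]; exact hKnd)]
  -- A's result items
  have hAitems : rA2.items = K.map (fun k => (k, rA2.getD k [])) := by
    have := PySem.Dict.items_eq_map_keys rA2 (hrA2keys ▸ hKnd) []
    rwa [hrA2keys] at this
  rw [hAitems]
  apply List.map_congr_left
  intro c hc
  rw [hf, hval c hc]

-- ===== VERDICT (by name: the statement is the Claim_ definition above) =====
theorem get_common_dict_spec : Claim_equal_get_common_dict := by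
  intro first_dct second_dct _
  unfold Spec_get_common_dict
  exact get_common_dict_eq first_dct second_dct
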